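-- pv_equiv track=rewrite | github.com/NaSchwartz/linear-cell | generator.py | multis
-- ===== SOURCE A (Python) =====
-- from itertools import combinations
--
-- def multis(num:str):
--     # Consturction of positions of the ones list
--     ones = []
--     i = 0
--     for ch in num:
--         if ch == "1":
--             ones.append(i)
--         i += 1
--
--     # Set of unique unordered elements
--     moves = set()
--
--     # Combinatorics :D
--     for i in range(2,len(ones)+1,1):
--         for comb in combinations(ones, i):
--             temp = list(num)
--             for j in comb:
--                 temp[j] = "0"
--
--             moves.add(''.join(temp))
--     return sorted(moves)
-- ===== SOURCE B (Python) =====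
-- def multis(num: str):
--     ones = [i for i, ch in enumerate(num) if ch == "1"]
--     # power set of the one-bit positions by iterative doubling (one flat pass)
--     subsets = [[]]
--     for p in ones:
--         subsets = subsets + [s + [p] for s in subsets]
--     moves = set()
--     for s in subsets:
--         if len(s) >= 2:
--             temp = list(num)
--             for j in s:
--                 temp[j] = "0"
--             moves.add("".join(temp))
--     return sorted(moves)
-- ===== Notes on version B (the rewrite author's own statement) =====
-- stated objective: alternative
-- what changed: Replaces the nested size-by-size itertools.combinations enumeration with a single power-set-by-doubling pass over the one-bit positions followed by one filter (len>=2) over the generated subsets.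
import Mathlib
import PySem

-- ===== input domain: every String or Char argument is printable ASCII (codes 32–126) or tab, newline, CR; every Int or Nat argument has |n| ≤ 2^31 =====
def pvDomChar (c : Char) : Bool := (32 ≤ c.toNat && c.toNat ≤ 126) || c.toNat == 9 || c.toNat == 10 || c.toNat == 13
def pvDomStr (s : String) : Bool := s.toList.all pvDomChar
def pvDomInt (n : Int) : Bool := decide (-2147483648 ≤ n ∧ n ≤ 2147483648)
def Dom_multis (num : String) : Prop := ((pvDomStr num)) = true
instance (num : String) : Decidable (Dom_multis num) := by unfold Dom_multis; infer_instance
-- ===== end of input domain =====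

-- B replaces A's size-by-size itertools.combinations enumeration by one power-set-by-doubling
-- pass over the one-bit positions plus a length-≥-2 filter; same results, similar cost (alternative).

-- ===== PORT A =====
-- 'temp = list(num); for j in comb: temp[j] = "0"' — the zeroing loop both sources contain verbatim
def pvZero (cs : List Char) (comb : List Nat) : List Char :=
  comb.foldl (fun temp j => temp.set j '0') cs

-- ones = []; i = 0; for ch in num: if ch == "1": ones.append(i); i += 1
def pvOnesA (cs : List Char) : List Nat :=
  (cs.foldl (fun (st : List Nat × Nat) ch =>
    (if ch = '1' then st.1 ++ [st.2] else st.1, st.2 + 1)) ([], 0)).1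

-- for i in range(2, len(ones)+1, 1): for comb in combinations(ones, i): moves.add(''.join(temp))
def pvMovesA (cs : List Char) (ones : List Nat) : PySem.Set String :=
  (PySem.List.pyRange 2 ((ones.length : Int) + 1) 1).foldl
    (fun m i => (PySem.List.combinations ones i.toNat).foldl
        (fun m comb => PySem.Set.add m (String.ofList (pvZero cs comb))) m)
    PySem.Set.empty

def multis (num : String) : List String :=
  PySem.List.sorted (pvMovesA num.toList (pvOnesA num.toList)) (fun x => x) false

-- ===== PORT B =====
-- ones = [i for i, ch in enumerate(num) if ch == "1"]
def pvOnesB (cs : List Char) : List Nat :=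
  ((cs.zipIdx).filter (fun p => p.1 == '1')).map Prod.snd

-- subsets = [[]]; for p in ones: subsets = subsets + [s + [p] for s in subsets]
def pvSubsets (ones : List Nat) : List (List Nat) :=
  ones.foldl (fun subs p => subs ++ subs.map (fun s => s ++ [p])) [[]]

-- for s in subsets: if len(s) >= 2: … moves.add("".join(temp))
def pvMovesB (cs : List Char) (subsets : List (List Nat)) : PySem.Set String :=
  subsets.foldl
    (fun m s => if 2 ≤ s.length then PySem.Set.add m (String.ofList (pvZero cs s)) else m)
    PySem.Set.empty

def multis_alt (num : String) : List String :=
  PySem.List.sorted (pvMovesB num.toList (pvSubsets (pvOnesB num.toList))) (fun x => x) false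

-- ===== PRECONDITION & SPEC =====
def Spec_multis (num : String) (out : List String) : Prop := out = multis_alt num
instance (num : String) (out : List String) : Decidable (Spec_multis num out) := by unfold Spec_multis; infer_instance

-- ===== CLAIM (what is proved, stated in full; the proofs are below) =====
def Claim_equal_multis : Prop := ∀ (num : String), Dom_multis num → Spec_multis num (multis num)

-- ===== LEMMAS AND PROOFS =====

-- both ports compute the same list of one-bit positions
theorem pv_ones_gen : ∀ (cs : List Char) (acc : List Nat) (i : Nat),
    (cs.foldl (fun (st : List Nat × Nat) ch =>
      (if ch = '1' then st.1 ++ [st.2] else st.1, st.2 + 1)) (acc, i)).1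
      = acc ++ ((cs.zipIdx i).filter (fun p => p.1 == '1')).map Prod.snd := by
  intro cs
  induction cs with
  | nil => intro acc i; simp
  | cons c cs ih =>
    intro acc i
    rw [List.foldl_cons]
    by_cases h : c = '1' <;> simp [h, List.zipIdx_cons, ih]

theorem pv_ones_eq (cs : List Char) : pvOnesA cs = pvOnesB cs := by
  simpa [pvOnesA, pvOnesB] using pv_ones_gen cs [] 0

-- membership in a fold that only adds elements to a PySem.Set
theorem pv_mem_foldl_set {α : Type} (P : α → String → Prop)
    (F : PySem.Set String → α → PySem.Set String)
    (hF : ∀ m c x, x ∈ F m c ↔ x ∈ m ∨ P c x) :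
    ∀ (l : List α) (m : PySem.Set String) (x : String),
      x ∈ l.foldl F m ↔ x ∈ m ∨ ∃ c ∈ l, P c x := by
  intro l
  induction l with
  | nil => intro m x; simp
  | cons a l ih =>
    intro m x
    rw [List.foldl_cons, ih, hF]
    constructor
    · rintro ((h | h) | ⟨c, hc, hp⟩)
      · exact .inl h
      · exact .inr ⟨a, by simp, h⟩
      · exact .inr ⟨c, by simp [hc], hp⟩
    · rintro (h | ⟨c, hc, hp⟩)
      · exact .inl (.inl h)
      · rcases List.mem_cons.mp hc with rfl | hc
        · exact .inl (.inr hp)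
        · exact .inr ⟨c, hc, hp⟩

theorem pv_nodup_foldl_set {α : Type}
    (F : PySem.Set String → α → PySem.Set String)
    (hF : ∀ m c, m.Nodup → (F m c).Nodup) :
    ∀ (l : List α) (m : PySem.Set String), m.Nodup → (l.foldl F m).Nodup := by
  intro l
  induction l with
  | nil => intro m h; exact h
  | cons a l ih => intro m h; exact ih _ (hF m a h)

-- B's doubling loop generates exactly the sublists of its input
theorem pv_mem_doubling : ∀ (l : List Nat) (acc : List (List Nat)) (x : List Nat),
    x ∈ l.foldl (fun subs p => subs ++ subs.map (fun s => s ++ [p])) acc ↔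
      ∃ y ∈ acc, ∃ c, c.Sublist l ∧ x = y ++ c := by
  intro l
  induction l with
  | nil => intro acc x; simp [List.sublist_nil]
  | cons a l ih =>
    intro acc x
    rw [List.foldl_cons, ih]
    constructor
    · rintro ⟨y, hy, c, hc, rfl⟩
      rcases List.mem_append.mp hy with hy | hy
      · exact ⟨y, hy, c, hc.cons a, rfl⟩
      · rcases List.mem_map.mp hy with ⟨z, hz, rfl⟩
        exact ⟨z, hz, a :: c, hc.cons₂ a, by simp⟩
    · rintro ⟨y, hy, c, hc, rfl⟩
      rcases List.sublist_cons_iff.mp hc with hc | ⟨r, rfl, hr⟩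
      · exact ⟨y, List.mem_append.mpr (.inl hy), c, hc, rfl⟩
      · exact ⟨y ++ [a], List.mem_append.mpr (.inr (List.mem_map.mpr ⟨y, hy, rfl⟩)),
          r, hr, by simp⟩

theorem pv_mem_movesA (cs : List Char) (ones : List Nat) (x : String) :
    x ∈ pvMovesA cs ones ↔
      ∃ c, c.Sublist ones ∧ 2 ≤ c.length ∧ x = String.ofList (pvZero cs c) := by
  unfold pvMovesA
  rw [pv_mem_foldl_set
        (P := fun i x => ∃ c ∈ PySem.List.combinations ones i.toNat,
          x = String.ofList (pvZero cs c))
        _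
        (fun m i x => pv_mem_foldl_set
          (P := fun c x => x = String.ofList (pvZero cs c)) _
          (fun m c x => PySem.Set.mem_add m _ x) _ m x)]
  simp only [PySem.Set.empty, List.not_mem_nil, false_or,
    PySem.List.mem_pyRange_one, PySem.List.mem_combinations_iff]
  constructor
  · rintro ⟨i, ⟨h2, hlt⟩, c, ⟨hsub, hlen⟩, rfl⟩
    exact ⟨c, hsub, by omega, rfl⟩
  · rintro ⟨c, hsub, hlen, rfl⟩
    have hle := hsub.length_le
    exact ⟨(c.length : Int), ⟨by omega, by omega⟩, c, ⟨hsub, by simp⟩, rfl⟩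

theorem pv_mem_movesB (cs : List Char) (ones : List Nat) (x : String) :
    x ∈ pvMovesB cs (pvSubsets ones) ↔
      ∃ c, c.Sublist ones ∧ 2 ≤ c.length ∧ x = String.ofList (pvZero cs c) := by
  unfold pvMovesB pvSubsets
  rw [pv_mem_foldl_set
        (P := fun s x => 2 ≤ s.length ∧ x = String.ofList (pvZero cs s)) _
        (fun m s x => by
          split_ifs with h
          · rw [PySem.Set.mem_add]; tauto
          · tauto)]
  simp only [PySem.Set.empty, List.not_mem_nil, false_or, pv_mem_doubling,
    List.mem_singleton]
  constructor
  · rintro ⟨s, ⟨y, rfl, c, hc, rfl⟩, hlen, rfl⟩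
    exact ⟨s, hc, hlen, rfl⟩
  · rintro ⟨c, hsub, hlen, rfl⟩
    exact ⟨c, ⟨[], rfl, c, hsub, by simp⟩, hlen, rfl⟩

theorem pv_nodup_movesA (cs : List Char) (ones : List Nat) :
    (pvMovesA cs ones).Nodup := by
  unfold pvMovesA
  refine pv_nodup_foldl_set _ (fun m i h => ?_) _ _ (by simp [PySem.Set.empty])
  exact pv_nodup_foldl_set _ (fun m c h => PySem.Set.nodup_add m _ h) _ m h

theorem pv_nodup_movesB (cs : List Char) (subsets : List (List Nat)) :
    (pvMovesB cs subsets).Nodup := by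
  unfold pvMovesB
  refine pv_nodup_foldl_set _ (fun m s h => ?_) _ _ (by simp [PySem.Set.empty])
  split_ifs with hs
  · exact PySem.Set.nodup_add m _ h
  · exact h

-- ===== VERDICT (by name: the statement is the Claim_ definition above) =====
theorem multis_spec : Claim_equal_multis := by
  intro num _
  unfold Spec_multis multis multis_alt
  rw [pv_ones_eq]
  refine PySem.List.sorted_eq_sorted_of_perm _ _ _ (fun a b h => h) ?_
  refine (List.perm_ext_iff_of_nodup (pv_nodup_movesA _ _) (pv_nodup_movesB _ _)).mpr ?_
  intro x
  rw [pv_mem_movesA, pv_mem_movesB]
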